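-- pv_equiv track=rewrite | github.com/PLeVasseur/fls | tools/changelog_assistant.py | entry_lines
-- ===== SOURCE A (Python) =====
-- from collections import defaultdict
--
-- def entry_lines(title, pr_url, tags, changes):
--     if title and pr_url:
--         first = f"- `{title} <{pr_url}>`_"
--     else:
--         first = "- TODO: fill release item title and upstream PR URL"
--
--     grouped = defaultdict(list)
--     for change in changes:
--         grouped[change["type"]].append(change)
--
--     lines = [first, "", f"  - Change tags: {', '.join(tags)}"]
--
--     for label, change_type in (
--         ("Added paragraphs", "paragraph_added"),
--         ("Removed paragraphs", "paragraph_removed"),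
--         ("Changed paragraphs", "paragraph_changed"),
--         ("Role changes", "role_change"),
--         ("Term definitions added", "term_def_added"),
--         ("Term definitions removed", "term_def_removed"),
--         ("Term references added", "term_ref_added"),
--         ("Term references removed", "term_ref_removed"),
--         ("Syntax definitions added", "syntax_def_added"),
--         ("Syntax definitions removed", "syntax_def_removed"),
--         ("Syntax references added", "syntax_ref_added"),
--         ("Syntax references removed", "syntax_ref_removed"),
--         ("Literal changes", "literal_change"),
--         ("List structure changes", "list_structure_change"),
--         ("Sections added", "section_added"),
--         ("Sections removed", "section_removed"),
--         ("Definitions relocated", "definition_relocated"),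
--         ("Normative shifts", "normative_shift"),
--     ):
--         records = grouped.get(change_type)
--         if not records:
--             continue
--         lines.append(f"  - {label}:")
--         for record in records:
--             if "paragraph_id" in record:
--                 lines.append(f"    - :p:`{record['paragraph_id']}`")
--             elif "section_id" in record:
--                 lines.append(f"    - :ref:`{record['section_id']}`")
--             else:
--                 lines.append(f"    - {record.get('id', '<unknown>')}")
--
--     lines.append("")
--     return lines
-- ===== SOURCE B (Python) =====
-- _CATALOG = (
--     ("Added paragraphs", "paragraph_added"),
--     ("Removed paragraphs", "paragraph_removed"),
--     ("Changed paragraphs", "paragraph_changed"),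
--     ("Role changes", "role_change"),
--     ("Term definitions added", "term_def_added"),
--     ("Term definitions removed", "term_def_removed"),
--     ("Term references added", "term_ref_added"),
--     ("Term references removed", "term_ref_removed"),
--     ("Syntax definitions added", "syntax_def_added"),
--     ("Syntax definitions removed", "syntax_def_removed"),
--     ("Syntax references added", "syntax_ref_added"),
--     ("Syntax references removed", "syntax_ref_removed"),
--     ("Literal changes", "literal_change"),
--     ("List structure changes", "list_structure_change"),
--     ("Sections added", "section_added"),
--     ("Sections removed", "section_removed"),
--     ("Definitions relocated", "definition_relocated"),
--     ("Normative shifts", "normative_shift"),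
-- )
--
--
-- def _line(r):
--     if "paragraph_id" in r:
--         return "    - :p:`" + r["paragraph_id"] + "`"
--     if "section_id" in r:
--         return "    - :ref:`" + r["section_id"] + "`"
--     return "    - " + r.get("id", "<unknown>")
--
--
-- def _block(label, recs):
--     if not recs:
--         return []
--     return ["  - " + label + ":"] + [_line(r) for r in recs]
--
--
-- def entry_lines(title, pr_url, tags, changes):
--     header = [
--         "- `" + title + " <" + pr_url + ">`_" if title and pr_url
--         else "- TODO: fill release item title and upstream PR URL",
--         "",
--         "  - Change tags: " + ", ".join(tags),
--     ]
--     body = [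
--         line
--         for label, kind in _CATALOG
--         for line in _block(label, [c for c in changes if c["type"] == kind])
--     ]
--     return header + body + [""]
-- ===== Notes on version B (the rewrite author's own statement) =====
-- stated objective: simpler
-- what changed: Removes the defaultdict grouping pass and the mutable lines accumulator: B builds the result as header ++ concatenation of independently rendered per-category blocks (a flat comprehension over a per-category filter of changes), maintaining no dictionary and no shared state.
import Mathlib
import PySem

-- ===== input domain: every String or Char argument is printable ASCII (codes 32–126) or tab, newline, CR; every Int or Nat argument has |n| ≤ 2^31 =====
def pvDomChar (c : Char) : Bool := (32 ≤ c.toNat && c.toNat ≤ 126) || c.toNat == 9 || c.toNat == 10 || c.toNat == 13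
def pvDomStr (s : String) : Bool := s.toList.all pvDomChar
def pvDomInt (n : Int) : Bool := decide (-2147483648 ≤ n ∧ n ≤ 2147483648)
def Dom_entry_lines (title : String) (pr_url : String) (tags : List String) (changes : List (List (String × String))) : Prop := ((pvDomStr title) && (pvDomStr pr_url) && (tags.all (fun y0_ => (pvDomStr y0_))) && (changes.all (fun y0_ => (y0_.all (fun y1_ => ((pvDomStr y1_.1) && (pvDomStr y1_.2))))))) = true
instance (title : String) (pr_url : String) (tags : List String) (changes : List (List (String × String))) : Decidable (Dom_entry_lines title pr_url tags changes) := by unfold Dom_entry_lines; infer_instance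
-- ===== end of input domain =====

-- B replaces A's defaultdict grouping pass and mutable lines accumulator by a flat
-- concatenation of independently rendered per-category blocks (objective: simpler).

-- the fixed (label, change_type) table, identical in both Pythons
def pvCategories : List (String × String) :=
  [("Added paragraphs", "paragraph_added"),
   ("Removed paragraphs", "paragraph_removed"),
   ("Changed paragraphs", "paragraph_changed"),
   ("Role changes", "role_change"),
   ("Term definitions added", "term_def_added"),
   ("Term definitions removed", "term_def_removed"),
   ("Term references added", "term_ref_added"),
   ("Term references removed", "term_ref_removed"),
   ("Syntax definitions added", "syntax_def_added"),
   ("Syntax definitions removed", "syntax_def_removed"),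
   ("Syntax references added", "syntax_ref_added"),
   ("Syntax references removed", "syntax_ref_removed"),
   ("Literal changes", "literal_change"),
   ("List structure changes", "list_structure_change"),
   ("Sections added", "section_added"),
   ("Sections removed", "section_removed"),
   ("Definitions relocated", "definition_relocated"),
   ("Normative shifts", "normative_shift")]

-- ===== PORT A =====
-- change["type"] (Pre_ guarantees the key is present; the `getD ""` default is never
-- reached inside Pre_ — in Python a missing key is a KeyError, excluded by Pre_).
def pvType (c : List (String × String)) : String :=
  ((PySem.Dict.mk c).get? "type").getD ""

-- A's per-record branch (:p: / :ref: / id line), via the dict API as A writes it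
def pvRecordLine (r : List (String × String)) : String :=
  if (PySem.Dict.mk r).contains "paragraph_id" then
    "    - :p:`" ++ ((PySem.Dict.mk r).get? "paragraph_id").getD "" ++ "`"
  else if (PySem.Dict.mk r).contains "section_id" then
    "    - :ref:`" ++ ((PySem.Dict.mk r).get? "section_id").getD "" ++ "`"
  else
    "    - " ++ (PySem.Dict.mk r).getD "id" "<unknown>"

def entry_lines (title : String) (pr_url : String) (tags : List String) (changes : List (List (String × String))) : List String :=
  let first :=
    if title ≠ "" ∧ pr_url ≠ "" then "- `" ++ title ++ " <" ++ pr_url ++ ">`_"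
    else "- TODO: fill release item title and upstream PR URL"
  -- grouped = defaultdict(list); for change in changes: grouped[change["type"]].append(change)
  let grouped : PySem.Dict String (List (List (String × String))) :=
    changes.foldl (fun d c => d.modify (pvType c) [] (· ++ [c])) PySem.Dict.empty
  let lines := [first, "", "  - Change tags: " ++ PySem.Str.join ", " tags]
  let lines := pvCategories.foldl (fun lines lc =>
    match grouped.get? lc.2 with
    | none => lines                                -- records falsy: continue
    | some records =>
      if records.isEmpty then lines                -- records falsy: continue
      else records.foldl (fun ls r => ls ++ [pvRecordLine r])
             (lines ++ ["  - " ++ lc.1 ++ ":"])) lines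
  lines ++ [""]

-- ===== PORT B =====
-- B's per-record line: plain first-match association-list lookups (Python dict `in` / [] / .get)
def pvLineB (r : List (String × String)) : String :=
  match r.lookup "paragraph_id" with
  | some p => "    - :p:`" ++ p ++ "`"
  | none =>
    match r.lookup "section_id" with
    | some s => "    - :ref:`" ++ s ++ "`"
    | none => "    - " ++ (r.lookup "id").getD "<unknown>"

-- B's _block: empty for no records, otherwise a heading consed onto the rendered records
def pvBlockB (label : String) (recs : List (List (String × String))) : List String :=
  match recs with
  | [] => []
  | _ => ("  - " ++ label ++ ":") :: recs.map pvLineB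

def entry_lines_alt (title : String) (pr_url : String) (tags : List String) (changes : List (List (String × String))) : List String :=
  let header :=
    [if title ≠ "" ∧ pr_url ≠ "" then "- `" ++ title ++ " <" ++ pr_url ++ ">`_"
     else "- TODO: fill release item title and upstream PR URL",
     "",
     "  - Change tags: " ++ PySem.Str.join ", " tags]
  let body := pvCategories.flatMap (fun p =>
    pvBlockB p.1 (changes.filter (fun c => (c.lookup "type").getD "" == p.2)))
  header ++ body ++ [""]

-- ===== PRECONDITION & SPEC =====
-- Pre_ excludes changes lacking a "type" key: Python A (and B) raise KeyError there.
def Pre_entry_lines (title : String) (pr_url : String) (tags : List String) (changes : List (List (String × String))) : Prop :=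
  ∀ c ∈ changes, (PySem.Dict.mk c).contains "type" = true
instance (title : String) (pr_url : String) (tags : List String) (changes : List (List (String × String))) : Decidable (Pre_entry_lines title pr_url tags changes) := by unfold Pre_entry_lines; infer_instance

def pvWitness_entry_lines : String × String × List String × (List (List (String × String))) :=
  ("T", "http://u", ["t1"], [[("type", "section_added"), ("section_id", "s1")]])

def Spec_entry_lines (title : String) (pr_url : String) (tags : List String) (changes : List (List (String × String))) (out : List String) : Prop := out = entry_lines_alt title pr_url tags changes
instance (title : String) (pr_url : String) (tags : List String) (changes : List (List (String × String))) (out : List String) : Decidable (Spec_entry_lines title pr_url tags changes out) := by unfold Spec_entry_lines; infer_instance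

-- ===== CLAIM =====
def Claim_equal_entry_lines : Prop := ∀ (title : String) (pr_url : String) (tags : List String) (changes : List (List (String × String))), Dom_entry_lines title pr_url tags changes → Pre_entry_lines title pr_url tags changes → Spec_entry_lines title pr_url tags changes (entry_lines title pr_url tags changes)

-- ===== LEMMAS AND PROOFS =====

-- the dict API A uses is first-match lookup on the association list
theorem pv_get?_mk_eq_lookup (c : List (String × String)) (k : String) :
    (PySem.Dict.mk c).get? k = c.lookup k := by
  induction c with
  | nil => simp [PySem.Dict.get?]
  | cons p rest ih =>
    obtain ⟨a, v⟩ := p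
    rw [PySem.Dict.get?_mk_cons]
    by_cases h : a = k
    · simp [h, List.lookup]
    · have h2 : (k == a) = false := by simp [Ne.symm h]
      simp [h, List.lookup, h2, ih]

-- the two per-record renderers agree
theorem pv_line_eq (r : List (String × String)) : pvRecordLine r = pvLineB r := by
  unfold pvRecordLine pvLineB
  rw [PySem.Dict.contains_eq_isSome_get?, PySem.Dict.contains_eq_isSome_get?,
      PySem.Dict.getD_eq_get?_getD, pv_get?_mk_eq_lookup, pv_get?_mk_eq_lookup,
      pv_get?_mk_eq_lookup]
  cases r.lookup "paragraph_id" <;> cases r.lookup "section_id" <;> simp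

-- A's grouping dict, looked up with default [], is exactly B's filter of changes.
theorem pv_getD_grouped (changes : List (List (String × String))) (ct : String) :
    (changes.foldl (fun d c => d.modify (pvType c) [] (· ++ [c]))
        (PySem.Dict.empty : PySem.Dict String (List (List (String × String))))).getD ct []
      = changes.filter (fun c => (c.lookup "type").getD "" == ct) := by
  have h : changes.foldl (fun d c => d.modify (pvType c) [] (· ++ [c]))
        (PySem.Dict.empty : PySem.Dict String (List (List (String × String))))
      = (changes.map (fun c => (pvType c, c))).foldl
          (fun d p => d.modify p.1 [] (· ++ [p.2])) PySem.Dict.empty := by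
    rw [List.foldl_map]
  rw [h, PySem.Dict.getD_foldl_modify_append, PySem.Dict.getD_empty]
  have hp : (fun c : List (String × String) => pvType c == ct)
      = (fun c => (c.lookup "type").getD "" == ct) := by
    funext c; simp [pvType, pv_get?_mk_eq_lookup]
  simp [List.filter_map, Function.comp_def, ← hp]

-- A's per-category step appends exactly B's block
theorem pv_step_eq (changes : List (List (String × String))) (lines : List String)
    (lc : String × String) :
    (match (changes.foldl (fun d c => d.modify (pvType c) [] (· ++ [c]))
        (PySem.Dict.empty : PySem.Dict String (List (List (String × String))))).get? lc.2 with
     | none => lines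
     | some records =>
       if records.isEmpty then lines
       else records.foldl (fun ls r => ls ++ [pvRecordLine r]) (lines ++ ["  - " ++ lc.1 ++ ":"]))
    = lines ++ pvBlockB lc.1 (changes.filter (fun c => (c.lookup "type").getD "" == lc.2)) := by
  have hd := pv_getD_grouped changes lc.2
  cases hg : (changes.foldl (fun d c => d.modify (pvType c) [] (· ++ [c]))
      (PySem.Dict.empty : PySem.Dict String (List (List (String × String))))).get? lc.2 with
  | none =>
    rw [PySem.Dict.getD_eq_get?_getD, hg] at hd
    simp only [Option.getD_none] at hd
    rw [← hd]
    simp [pvBlockB]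
  | some records =>
    rw [PySem.Dict.getD_eq_get?_getD, hg, Option.getD_some] at hd
    rw [← hd]
    cases records with
    | nil => simp [pvBlockB]
    | cons r rs =>
      simp only [List.isEmpty_cons, pvBlockB, Bool.false_eq_true, if_false]
      rw [PySem.List.foldl_append_singleton_eq_map]
      simp [pv_line_eq]

-- ===== VERDICT =====
theorem entry_lines_spec : Claim_equal_entry_lines := by
  intro title pr_url tags changes _ _
  unfold Spec_entry_lines entry_lines entry_lines_alt
  dsimp only
  rw [List.foldl_ext _
      (fun lines (lc : String × String) =>
        lines ++ pvBlockB lc.1 (changes.filter (fun c => (c.lookup "type").getD "" == lc.2)))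
      _ (fun l lc _ => pv_step_eq changes l lc),
    PySem.List.foldl_append_eq_flatMap]
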